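-- pv_equiv track=rewrite | github.com/UIUCSoftwareiGEM/bioMORTAR | strain_designer/views.py | __process_gene_result__
-- ===== SOURCE A (Python) =====
-- def __process_gene_result__(result, orgfullname, homologs=None):
--   result = result.split()
--   info = [result[0][1:]]
--   sequence = []
--   one_way_flag = False
--   for entry in result[1:]:
--     if(one_way_flag):
--       sequence.append(entry.strip().upper())
--     elif(entry != '(N)'):
--       entry = entry.strip()
--       if(entry[-1] == ',' or entry[-1] == ';'):
--         info.append(entry[:-1])
--       else:
--         info.append(entry)
--     else:
--       one_way_flag = True
--   #from igem.imptools.biobrick import *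
--   #colors = check_sequence(sequence)
--   #sequence = add_color(sequence, colors)
--   if homologs == None:
--     return (info, sequence, [orgfullname])
--   else:
--     return (info, sequence, [orgfullname]+homologs)
-- ===== SOURCE B (Python) =====
-- def __process_gene_result__(result, orgfullname, homologs=None):
--     tokens = result.split()
--     first = tokens[0][1:]
--     rest = tokens[1:]
--     try:
--         d = rest.index('(N)')
--     except ValueError:
--         d = len(rest)
--     info = [first] + [t[:-1] if t[-1] in (',', ';') else t for t in rest[:d]]
--     sequence = [t.upper() for t in rest[d + 1:]]
--     organisms = [orgfullname] if homologs is None else [orgfullname] + homologs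
--     return (info, sequence, organisms)
-- ===== Notes on version B (the rewrite author's own statement) =====
-- stated objective: simpler
-- what changed: Replaces A's flag-driven accumulator loop by locating the index of the first '(N)' token and building info and sequence as two independent comprehensions over the slices before and after it.
import Mathlib
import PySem

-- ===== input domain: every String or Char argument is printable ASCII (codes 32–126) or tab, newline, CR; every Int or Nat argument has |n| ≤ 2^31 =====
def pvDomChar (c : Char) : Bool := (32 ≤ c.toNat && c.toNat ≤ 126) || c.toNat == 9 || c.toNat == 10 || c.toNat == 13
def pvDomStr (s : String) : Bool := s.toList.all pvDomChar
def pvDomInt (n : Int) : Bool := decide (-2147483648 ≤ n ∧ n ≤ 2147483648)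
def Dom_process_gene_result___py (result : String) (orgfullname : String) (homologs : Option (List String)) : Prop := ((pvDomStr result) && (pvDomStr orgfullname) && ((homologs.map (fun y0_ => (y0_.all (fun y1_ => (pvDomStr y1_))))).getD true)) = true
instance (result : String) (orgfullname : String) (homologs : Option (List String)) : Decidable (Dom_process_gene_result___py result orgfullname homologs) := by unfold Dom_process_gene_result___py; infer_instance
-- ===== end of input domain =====

-- B replaces A's flag-driven loop by an index-of-'(N)' split and two independent maps over the slices: simpler decomposition, same cost.


-- ===== PORT A =====
-- one iteration of A's for-loop over (info, sequence, one_way_flag)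
def pgrStepA (st : List String × List String × Bool) (entry : String) : List String × List String × Bool :=
  if st.2.2 then
    (st.1, st.2.1 ++ [PySem.Str.upper (PySem.Str.strip entry)], true)
  else if entry ≠ "(N)" then
    let e := PySem.Str.strip entry
    -- entry[-1]: tokens of split() are nonempty, so the `none` (IndexError) case is unreachable
    match PySem.Str.pyGet? e (-1) with
    | some c => if c = ',' ∨ c = ';' then (st.1 ++ [PySem.Str.slice e none (some (-1))], st.2.1, false)
                else (st.1 ++ [e], st.2.1, false)
    | none => (st.1 ++ [e], st.2.1, false)
  else (st.1, st.2.1, true)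

def process_gene_result___py (result : String) (orgfullname : String) (homologs : Option (List String)) : List String × List String × List String :=
  let toks := PySem.Str.split₀ result
  -- result[0][1:]; Pre_ excludes toks = [] (Python raises IndexError there)
  let first := PySem.Str.slice (toks.headD "") (some 1) none
  let st := (toks.tail).foldl pgrStepA ([first], [], false)
  match homologs with
  | none => (st.1, st.2.1, [orgfullname])
  | some hs => (st.1, st.2.1, orgfullname :: hs)

-- ===== PORT B =====
-- t[:-1] if t[-1] in (',', ';') else t   (the `none` case is unreachable: split() tokens are nonempty)
def pgrPunct (t : String) : String :=
  match PySem.Str.pyGet? t (-1) with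
  | some c => if c = ',' ∨ c = ';' then PySem.Str.slice t none (some (-1)) else t
  | none => t

def process_gene_result___py_alt (result : String) (orgfullname : String) (homologs : Option (List String)) : List String × List String × List String :=
  let tokens := PySem.Str.split₀ result
  -- tokens[0][1:]; Pre_ excludes tokens = [] (Python raises IndexError there)
  let first := PySem.Str.slice (tokens.headD "") (some 1) none
  let rest := tokens.tail
  let d : Nat := (PySem.List.index? rest "(N)").getD rest.length
  let info := first :: (PySem.List.slice rest none (some (d : Int))).map pgrPunct
  let sequence := (PySem.List.slice rest (some ((d : Int) + 1)) none).map PySem.Str.upper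
  let organisms := match homologs with
    | none => [orgfullname]
    | some hs => orgfullname :: hs
  (info, sequence, organisms)

-- ===== PRECONDITION & SPEC =====
-- Pre_ excludes exactly the inputs where result.split() is empty (result is all whitespace): there A (and B) raise IndexError on result[0].
def Pre_process_gene_result___py (result : String) (orgfullname : String) (homologs : Option (List String)) : Prop :=
  PySem.Str.split₀ result ≠ []
instance (result : String) (orgfullname : String) (homologs : Option (List String)) : Decidable (Pre_process_gene_result___py result orgfullname homologs) := by unfold Pre_process_gene_result___py; infer_instance
def pvWitness_process_gene_result___py : String × String × Option (List String) := (">gene1 some, info; (N) atg ccg", "Escherichia coli", some ["homolog1"])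

def Spec_process_gene_result___py (result : String) (orgfullname : String) (homologs : Option (List String)) (out : List String × List String × List String) : Prop := out = process_gene_result___py_alt result orgfullname homologs
instance (result : String) (orgfullname : String) (homologs : Option (List String)) (out : List String × List String × List String) : Decidable (Spec_process_gene_result___py result orgfullname homologs out) := by unfold Spec_process_gene_result___py; infer_instance

-- ===== CLAIM (what is proved, stated in full; the proofs are below) =====
def Claim_equal_process_gene_result___py : Prop := ∀ (result : String) (orgfullname : String) (homologs : Option (List String)), Dom_process_gene_result___py result orgfullname homologs → Pre_process_gene_result___py result orgfullname homologs → Spec_process_gene_result___py result orgfullname homologs (process_gene_result___py result orgfullname homologs)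

-- ===== LEMMAS AND PROOFS =====

-- every token produced by split₀ consists of non-whitespace characters
theorem pgr_split₀_go_nonspace (s : List Char) : ∀ (cur : List Char) (acc : List (List Char)),
    (∀ c ∈ cur, PySem.Chars.isspace c = false) →
    (∀ t ∈ acc, ∀ c ∈ t, PySem.Chars.isspace c = false) →
    ∀ t ∈ PySem.Chars.split₀.go s cur acc, ∀ c ∈ t, PySem.Chars.isspace c = false := by
  induction s with
  | nil =>
    intro cur acc hcur hacc t ht
    simp only [PySem.Chars.split₀.go] at ht
    split at ht
    · exact hacc t (by simpa using ht)
    · rcases List.mem_cons.mp (List.mem_reverse.mp ht) with h | h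
      · intro c hc; exact hcur c (List.mem_reverse.mp (h ▸ hc))
      · exact hacc t h
  | cons c rest ih =>
    intro cur acc hcur hacc t ht
    simp only [PySem.Chars.split₀.go] at ht
    by_cases hsp : PySem.Chars.isspace c = true
    · rw [if_pos hsp] at ht
      split at ht
      · exact ih [] acc (by simp) hacc t ht
      · refine ih [] (cur.reverse :: acc) (by simp) ?_ t ht
        intro u hu
        rcases List.mem_cons.mp hu with h | h
        · intro d hd; exact hcur d (List.mem_reverse.mp (h ▸ hd))
        · exact hacc u h
    · rw [if_neg hsp] at ht
      refine ih (c :: cur) acc ?_ hacc t ht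
      intro d hd
      rcases List.mem_cons.mp hd with h | h
      · simpa [h] using hsp
      · exact hcur d h

theorem pgr_strip_of_nonspace (l : List Char) (h : ∀ c ∈ l, PySem.Chars.isspace c = false) :
    PySem.Chars.strip l = l := by
  have hl : PySem.Chars.lstrip l = l := by
    unfold PySem.Chars.lstrip
    cases l with
    | nil => rfl
    | cons c cs => simp [List.dropWhile, h c (by simp)]
  have hrl : ∀ c ∈ l.reverse, PySem.Chars.isspace c = false := by
    intro c hc; exact h c (List.mem_reverse.mp hc)
  have hr : PySem.Chars.rstrip l = l := by
    unfold PySem.Chars.rstrip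
    cases hrev : l.reverse with
    | nil => simpa using congrArg List.reverse hrev
    | cons c cs =>
      rw [List.dropWhile]
      have : PySem.Chars.isspace c = false := hrl c (by rw [hrev]; simp)
      simp [this, ← hrev]
  unfold PySem.Chars.strip
  rw [hl, hr]

-- every token of the String-level split() is fixed by strip()
theorem pgr_strip_token {s t : String} (h : t ∈ PySem.Str.split₀ s) : PySem.Str.strip t = t := by
  have hmem : t.toList ∈ PySem.Chars.split₀ s.toList := by
    have := congrArg (fun l => t.toList ∈ l) (PySem.Str.split₀_map_toList s)
    simp only [List.mem_map, eq_iff_iff] at this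
    exact this.mp ⟨t, h, rfl⟩
  have hns : ∀ c ∈ t.toList, PySem.Chars.isspace c = false :=
    pgr_split₀_go_nonspace s.toList [] [] (by simp) (by simp) t.toList hmem
  show String.ofList (PySem.Chars.strip t.toList) = t
  rw [pgr_strip_of_nonspace _ hns, String.ofList_toList]

-- A's step on a non-'(N)' stripped-fixed token appends exactly pgrPunct of it
theorem pgr_stepA_eq (info seq : List String) (t : String) (hne : t ≠ "(N)") (hs : PySem.Str.strip t = t) :
    pgrStepA (info, seq, false) t = (info ++ [pgrPunct t], seq, false) := by
  simp only [pgrStepA, pgrPunct, hs, if_neg (by simp : ¬ (false = true)), if_pos hne]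
  cases PySem.Str.pyGet? t (-1) with
  | none => rfl
  | some c => by_cases hc : c = ',' ∨ c = ';' <;> simp [hc]

theorem pgr_foldA_true (L : List String) (hs : ∀ t ∈ L, PySem.Str.strip t = t) :
    ∀ info seq, L.foldl pgrStepA (info, seq, true) = (info, seq ++ L.map PySem.Str.upper, true) := by
  induction L with
  | nil => intro info seq; simp
  | cons t L ih =>
    intro info seq
    have ht : PySem.Str.strip t = t := hs t (by simp)
    have : pgrStepA (info, seq, true) t = (info, seq ++ [PySem.Str.upper t], true) := by
      simp [pgrStepA, ht]
    simp only [List.foldl_cons, this, ih (fun u hu => hs u (List.mem_cons_of_mem _ hu))]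
    simp

theorem pgr_foldA_false (L : List String) (hs : ∀ t ∈ L, PySem.Str.strip t = t) :
    ∀ info seq, L.foldl pgrStepA (info, seq, false) =
      (info ++ (L.take ((PySem.List.index? L "(N)").getD L.length)).map pgrPunct,
       seq ++ (L.drop ((PySem.List.index? L "(N)").getD L.length + 1)).map PySem.Str.upper,
       (PySem.List.index? L "(N)").isSome) := by
  induction L with
  | nil => intro info seq; simp [PySem.List.index?]
  | cons t L ih =>
    intro info seq
    by_cases hne : t = "(N)"
    · subst hne
      have hstep : pgrStepA (info, seq, false) "(N)" = (info, seq, true) := by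
        simp [pgrStepA]
      simp only [List.foldl_cons, hstep,
        pgr_foldA_true L (fun u hu => hs u (List.mem_cons_of_mem _ hu)) info seq,
        PySem.List.index?_cons_self]
      simp
    · have ht : PySem.Str.strip t = t := hs t (by simp)
      have hidx := PySem.List.index?_cons_of_ne (x := t) (v := "(N)") L hne
      have hd : (PySem.List.index? (t :: L) "(N)").getD (t :: L).length
          = (PySem.List.index? L "(N)").getD L.length + 1 := by
        rw [hidx]; cases PySem.List.index? L "(N)" <;> simp
      simp only [List.foldl_cons, pgr_stepA_eq info seq t hne ht,
        ih (fun u hu => hs u (List.mem_cons_of_mem _ hu)) (info ++ [pgrPunct t]) seq, hd]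
      rw [hidx]
      cases PySem.List.index? L "(N)" <;> simp [List.take_succ_cons, List.drop_succ_cons]

-- ===== VERDICT (by name: the statement is the Claim_ definition above) =====
theorem process_gene_result___py_spec : Claim_equal_process_gene_result___py := by
  intro result orgfullname homologs _ _
  simp only [Spec_process_gene_result___py, process_gene_result___py, process_gene_result___py_alt]
  have hs : ∀ t ∈ (PySem.Str.split₀ result).tail, PySem.Str.strip t = t := by
    intro t ht
    exact pgr_strip_token (List.mem_of_mem_tail ht)
  rw [pgr_foldA_false _ hs]
  generalize (PySem.Str.split₀ result).tail = L
  have h1 : ∀ d : Nat, PySem.List.slice L none (some (d : Int)) = L.take d :=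
    fun d => PySem.List.slice_to_natCast L d
  have h2 : ∀ d : Nat, PySem.List.slice L (some ((d : Int) + 1)) none = L.drop (d + 1) := by
    intro d
    have hc : ((d : Int) + 1) = ((d + 1 : Nat) : Int) := by push_cast; ring
    rw [hc, PySem.List.slice_from _ (by positivity), Int.toNat_natCast]
  cases homologs <;> simp [h1, h2]
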